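-- pv_equiv track=rewrite | github.com/mtfehl/finance | comp110/exercises/ex04/quiz_redo.py | is_tar
-- ===== SOURCE A (Python) =====
-- def is_tar(tar: str) -> bool:
--     """Is the input tar or not?"""
--     correct: bool = True
--     incorrect: bool = False
--     i: int = 0
--     if tar == "":
--         return incorrect
--     if tar[0] == "t":
--         i += 1
--         while i < (len(tar) - 1):
--             if tar[i] == "a":
--                 i += 1
--             else:
--                 return incorrect
--         if tar[len(tar) - 1] == "r":
--             return correct
--         else:
--             return incorrect
--     else:
--         return incorrect
-- ===== SOURCE B (Python) =====
-- def _step(state: int, c: str) -> int: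
--     """Transition function of a 3-state DFA for the regular language t a* r.
--
--     States: 0 = start, 1 = seen 't' then zero or more 'a', 2 = seen final 'r';
--     -1 marks the dead state (no transition).
--     """
--     if state == 0:
--         return 1 if c == "t" else -1
--     if state == 1:
--         if c == "a":
--             return 1
--         if c == "r":
--             return 2
--         return -1
--     return -1
--
--
-- def is_tar(tar: str) -> bool:
--     """Is the input tar or not?  (runs the DFA over the characters)"""
--     state = 0
--     for c in tar:
--         state = _step(state, c)
--         if state < 0:
--             return False
--     return state == 2
-- ===== Notes on version B (the rewrite author's own statement) =====
-- stated objective: alternative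
-- what changed: Replaces A's index-based scan with lookahead on the last character by a 3-state deterministic finite automaton for the regular language t a* r, folding the state through the characters with no indexing or length arithmetic.
import Mathlib
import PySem

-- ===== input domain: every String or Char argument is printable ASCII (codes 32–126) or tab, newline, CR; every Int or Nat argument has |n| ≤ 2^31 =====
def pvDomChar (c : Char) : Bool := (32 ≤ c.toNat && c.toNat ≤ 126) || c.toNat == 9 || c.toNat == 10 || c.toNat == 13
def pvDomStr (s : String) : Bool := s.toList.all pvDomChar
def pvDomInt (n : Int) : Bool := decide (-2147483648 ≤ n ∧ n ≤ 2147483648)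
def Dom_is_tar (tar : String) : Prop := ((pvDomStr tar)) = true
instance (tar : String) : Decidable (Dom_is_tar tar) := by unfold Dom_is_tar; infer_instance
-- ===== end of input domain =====

-- B replaces A's index loop (with lookahead on the last character) by a 3-state DFA
-- for the regular language t a* r folded over the characters (objective: alternative).

-- ===== PORT A =====
-- the 'while i < len(tar) - 1' loop; indices are always in range, so tar[i] is cs[i]?
def isTarLoopA (cs : List Char) (i : Nat) : Bool :=
  if i < cs.length - 1 then
    if cs[i]? = some 'a' then isTarLoopA cs (i + 1) else false
  else
    if cs[cs.length - 1]? = some 'r' then true else false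
termination_by cs.length - 1 - i

def is_tar (tar : String) : Bool :=
  let cs := tar.toList
  if cs = [] then false
  else if cs[0]? = some 't' then isTarLoopA cs 1
  else false

-- ===== PORT B =====
-- DFA transition: 0 = start, 1 = seen 't' then zero or more 'a', 2 = seen final 'r', -1 = dead
def stepB (state : Int) (c : Char) : Int :=
  if state = 0 then (if c = 't' then 1 else -1)
  else if state = 1 then
    (if c = 'a' then 1 else if c = 'r' then 2 else -1)
  else -1

-- the 'for c in tar' loop with its early 'return False'
def isTarLoopB (state : Int) : List Char → Bool
  | [] => state == 2
  | c :: cs =>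
    let s := stepB state c
    if s < 0 then false else isTarLoopB s cs

def is_tar_alt (tar : String) : Bool := isTarLoopB 0 tar.toList

-- ===== PRECONDITION & SPEC =====
def Spec_is_tar (tar : String) (out : Bool) : Prop := out = is_tar_alt tar
instance (tar : String) (out : Bool) : Decidable (Spec_is_tar tar out) := by unfold Spec_is_tar; infer_instance

-- ===== CLAIM (what is proved, stated in full; the proofs are below) =====
def Claim_equal_is_tar : Prop := ∀ (tar : String), Dom_is_tar tar → Spec_is_tar tar (is_tar tar)

-- ===== LEMMAS AND PROOFS =====

-- A's loop checks indices i..len-2 are all 'a', then that the last char is 'r'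
lemma isTarLoopA_eq (cs : List Char) (i : Nat) :
    isTarLoopA cs i =
      (((cs.drop i).dropLast).all (fun c => c = 'a') &&
        decide (cs[cs.length - 1]? = some 'r')) := by
  by_cases h : i < cs.length - 1
  · have hlt : i < cs.length := by omega
    have hdrop : cs.drop i = cs[i] :: cs.drop (i + 1) := List.drop_eq_getElem_cons hlt
    have hne : cs.drop (i + 1) ≠ [] := by
      simp [List.drop_eq_nil_iff]; omega
    have hdl : (cs.drop i).dropLast = cs[i] :: (cs.drop (i + 1)).dropLast := by
      rw [hdrop, List.dropLast_cons_of_ne_nil hne]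
    rw [isTarLoopA]
    simp only [h, if_true, hdl, List.all_cons]
    by_cases ha : cs[i] = 'a'
    · simp [ha, List.getElem?_eq_getElem hlt, isTarLoopA_eq cs (i + 1)]
    · simp [ha, List.getElem?_eq_getElem hlt]
  · have hdl : (cs.drop i).dropLast = [] := by
      have : (cs.drop i).length ≤ 1 := by simp; omega
      cases hd : cs.drop i with
      | nil => simp
      | cons x xs =>
        have := hd ▸ this
        simp at this
        simp [this]
    rw [isTarLoopA]
    simp [h, hdl]
termination_by cs.length - 1 - i

-- from state 1 the DFA accepts exactly a* r: all but the last char 'a', the last char 'r'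
lemma isTarLoopB_one (cs : List Char) :
    isTarLoopB 1 cs =
      (cs.dropLast.all (fun c => c = 'a') && decide (cs[cs.length - 1]? = some 'r')) := by
  induction cs with
  | nil => simp [isTarLoopB]
  | cons c cs ih =>
    by_cases ha : c = 'a'
    · subst ha
      cases cs with
      | nil => simp [isTarLoopB, stepB]
      | cons d ds =>
        simp only [isTarLoopB, stepB] at ih ⊢
        simpa using ih
    · by_cases hr : c = 'r'
      · subst hr
        cases cs with
        | nil => simp [isTarLoopB, stepB]
        | cons d ds =>
          simp [isTarLoopB, stepB]
      · cases cs with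
        | nil => simp [isTarLoopB, stepB, ha, hr]
        | cons d ds => simp [isTarLoopB, stepB, ha, hr]

-- ===== VERDICT (by name: the statement is the Claim_ definition above) =====
theorem is_tar_spec : Claim_equal_is_tar := by
  intro tar _
  unfold Spec_is_tar is_tar is_tar_alt
  cases hcs : tar.toList with
  | nil => simp [isTarLoopB]
  | cons c cs =>
    by_cases ht : c = 't'
    · subst ht
      have hB : isTarLoopB 0 ('t' :: cs) = isTarLoopB 1 cs := by
        simp [isTarLoopB, stepB]
      rw [hB, isTarLoopB_one]
      simp only [isTarLoopA_eq]
      cases cs with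
      | nil => simp
      | cons d ds =>
        simp only [List.length_cons, Nat.add_sub_cancel, List.getElem?_cons_succ,
          List.cons_ne_nil, if_false, List.getElem?_cons_zero, List.drop_succ_cons,
          List.drop_zero, Option.some.injEq, if_pos, decide_true, reduceIte]
    · simp [ht, isTarLoopB, stepB]
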